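-- pv_equiv track=rewrite | github.com/patanet7/livetranslate | modules/transcription-service/benchmarks/metrics.py | align_hypothesis_to_reference
-- ===== SOURCE A (Python) =====
-- CJK_LANGUAGES = {"zh", "ja", "ko"}
--
-- def align_hypothesis_to_reference(
--     hypothesis_segments: list[str],
--     reference: str,
--     language: str,
-- ) -> str:
--     """Concatenate hypothesis segments into one string aligned with reference.
--
--     Online VAC output is N segments that do not correspond 1:1 with reference
--     turns.  This simply joins them (removing any overlap-boundary duplicates)
--     for corpus-level metric computation.
--
--     Deduplication strategy: if the end of the accumulated text already
--     contains the beginning of the next segment (within a 10-token window),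
--     the overlapping part is dropped before appending.
--     """
--     if not hypothesis_segments:
--         return ""
--
--     is_cjk = language in CJK_LANGUAGES
--     sep = "" if is_cjk else " "
--     joined = hypothesis_segments[0]
--
--     for seg in hypothesis_segments[1:]:
--         seg = seg.strip()
--         if not seg:
--             continue
--         # Check overlap: last N chars/words of accumulated vs first N of seg
--         window = 15 if is_cjk else 8
--         tail = joined[-window * 3:] if is_cjk else " ".join(joined.split()[-window:])
--         head = seg[:window * 3] if is_cjk else " ".join(seg.split()[:window])
--         # Find longest suffix of tail that is a prefix of head
--         overlap_len = 0
--         for k in range(min(len(tail), len(head)), 0, -1):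
--             if tail.endswith(head[:k]):
--                 overlap_len = k
--                 break
--         seg = seg[overlap_len:].lstrip() if overlap_len else seg
--         if seg:
--             joined = joined + sep + seg
--
--     return joined.strip()
-- ===== SOURCE B (Python) =====
-- CJK_LANGUAGES = {"zh", "ja", "ko"}
--
--
-- def _overlap(tail, head):
--     """Longest k with tail.endswith(head[:k]), found by simulating the
--     nondeterministic prefix-matching automaton over tail: live is the
--     descending list of all lengths k whose head-prefix matches the suffix
--     of the part of tail consumed so far; live[0] is the maximum at the end."""
--     live = [0]
--     for c in tail:
--         live = [k + 1 for k in live if k < len(head) and head[k] == c] + [0]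
--     return live[0]
--
--
-- def align_hypothesis_to_reference(
--     hypothesis_segments: list[str],
--     reference: str,
--     language: str,
-- ) -> str:
--     """Join segments dropping overlap-boundary duplicates, in one linear pass.
--
--     Keeps a parts list (joined once at the end) and maintains the
--     deduplication window incrementally (last 45 characters for CJK, a running
--     token list otherwise); the overlap length is computed by the prefix
--     automaton in _overlap instead of trying every candidate length.
--     """
--     if not hypothesis_segments:
--         return ""
--
--     if language in CJK_LANGUAGES:
--         parts = [hypothesis_segments[0]]
--         tailbuf = hypothesis_segments[0][-45:]
--         for raw in hypothesis_segments[1:]: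
--             seg = raw.strip()
--             if not seg:
--                 continue
--             ov = _overlap(tailbuf, seg[:45])
--             if ov:
--                 seg = seg[ov:].lstrip()
--             if seg:
--                 parts.append(seg)
--                 tailbuf = (tailbuf + seg)[-45:]
--         return "".join(parts).strip()
--
--     parts = [hypothesis_segments[0]]
--     toks = hypothesis_segments[0].split()
--     for raw in hypothesis_segments[1:]:
--         seg = raw.strip()
--         if not seg:
--             continue
--         ov = _overlap(" ".join(toks[-8:]), " ".join(seg.split()[:8]))
--         if ov:
--             seg = seg[ov:].lstrip()
--         if seg:
--             parts.append(seg)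
--             toks.extend(seg.split())
--     return " ".join(parts).strip()
-- ===== Notes on version B (the rewrite author's own statement) =====
-- stated objective: faster
-- what changed: B builds a parts list joined once at the end, maintains the deduplication window incrementally (last-45-character buffer for CJK, a running token list otherwise) instead of re-splitting/re-concatenating the accumulated string per segment, and finds the overlap length by simulating a prefix-matching automaton over the tail window (a live set of match lengths) instead of testing every candidate length with endswith.
import Mathlib
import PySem

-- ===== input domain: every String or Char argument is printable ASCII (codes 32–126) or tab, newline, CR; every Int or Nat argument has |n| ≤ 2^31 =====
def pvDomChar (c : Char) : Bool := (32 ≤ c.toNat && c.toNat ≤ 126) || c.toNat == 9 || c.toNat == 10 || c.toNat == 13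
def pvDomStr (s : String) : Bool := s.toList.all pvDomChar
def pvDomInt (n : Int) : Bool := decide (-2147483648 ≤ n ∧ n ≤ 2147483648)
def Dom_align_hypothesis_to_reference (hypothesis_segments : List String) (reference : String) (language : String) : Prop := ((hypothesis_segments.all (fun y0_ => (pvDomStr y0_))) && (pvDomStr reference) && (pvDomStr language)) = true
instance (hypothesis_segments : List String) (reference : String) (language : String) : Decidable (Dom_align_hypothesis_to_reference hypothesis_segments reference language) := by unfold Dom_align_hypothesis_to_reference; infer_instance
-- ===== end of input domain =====

-- B keeps a parts list (joined once at the end), maintains the dedup window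
-- incrementally (last-45-char buffer for CJK, running token list otherwise),
-- and finds the overlap by a prefix-matching automaton instead of trying
-- every candidate length; objective: faster.

def pvCJK_LANGUAGES : PySem.Set String := PySem.Set.ofList ["zh", "ja", "ko"]

-- ===== PORT A =====
-- for k in range(min(len(tail), len(head)), 0, -1): if tail.endswith(head[:k]): overlap_len = k; break
def pvOvDescA (tl hd : List Char) : Nat → Nat
  | 0 => 0
  | k+1 =>
    if PySem.Chars.endswith tl (PySem.List.slice hd none (some ((k+1 : Nat) : Int))) then k+1
    else pvOvDescA tl hd k

-- one iteration of A's loop, state = joined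
def pvStepA (isCjk : Bool) (sep : List Char) (j : List Char) (s : String) : List Char :=
  let seg := PySem.Chars.strip s.toList
  if seg.isEmpty then j else
    let window : Int := if isCjk then 15 else 8
    let tl := if isCjk then PySem.List.slice j (some (-(window*3))) none
              else PySem.Chars.join [' '] (PySem.List.slice (PySem.Chars.split₀ j) (some (-window)) none)
    let hd := if isCjk then PySem.List.slice seg none (some (window*3))
              else PySem.Chars.join [' '] (PySem.List.slice (PySem.Chars.split₀ seg) none (some window))
    let ov := pvOvDescA tl hd (min tl.length hd.length)
    let seg2 := if ov ≠ 0 then PySem.Chars.lstrip (PySem.List.slice seg (some (ov : Int)) none) else seg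
    if seg2.isEmpty then j else j ++ sep ++ seg2

def align_hypothesis_to_reference (hypothesis_segments : List String) (reference : String) (language : String) : String :=
  match hypothesis_segments with
  | [] => ""
  | s0 :: rest =>
    let isCjk := PySem.Set.contains pvCJK_LANGUAGES language
    let sep : List Char := if isCjk then [] else [' ']
    String.ofList (PySem.Chars.strip (rest.foldl (pvStepA isCjk sep) s0.toList))

-- ===== PORT B =====
-- live = [k + 1 for k in live if k < len(head) and head[k] == c] + [0]
-- (head[k] is evaluated only under the guard k < len(head); getD is exact there)
def pvLiveStep (hd : List Char) (live : List Nat) (c : Char) : List Nat :=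
  ((live.filter (fun k => decide (k < hd.length) && (hd.getD k ' ' == c))).map (· + 1)) ++ [0]

-- def _overlap(tail, head): live = [0]; for c in tail: …; return live[0]
-- (live is never empty: it always ends with the appended 0, so live[0] = headD 0 is exact)
def pvOvAuto (tl hd : List Char) : Nat :=
  (tl.foldl (pvLiveStep hd) [0]).headD 0

-- one iteration of B's CJK loop, state = (parts, tailbuf)
def pvStepBC (st : List (List Char) × List Char) (s : String) : List (List Char) × List Char :=
  let seg := PySem.Chars.strip s.toList
  if seg.isEmpty then st else
    let ov := pvOvAuto st.2 (PySem.List.slice seg none (some 45))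
    let seg2 := if ov ≠ 0 then PySem.Chars.lstrip (PySem.List.slice seg (some (ov : Int)) none) else seg
    if seg2.isEmpty then st else (st.1 ++ [seg2], PySem.List.slice (st.2 ++ seg2) (some (-45)) none)

-- one iteration of B's word loop, state = (parts, toks)
def pvStepBW (st : List (List Char) × List (List Char)) (s : String) : List (List Char) × List (List Char) :=
  let seg := PySem.Chars.strip s.toList
  if seg.isEmpty then st else
    let ov := pvOvAuto (PySem.Chars.join [' '] (PySem.List.slice st.2 (some (-8)) none))
                       (PySem.Chars.join [' '] (PySem.List.slice (PySem.Chars.split₀ seg) none (some 8)))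
    let seg2 := if ov ≠ 0 then PySem.Chars.lstrip (PySem.List.slice seg (some (ov : Int)) none) else seg
    if seg2.isEmpty then st else (st.1 ++ [seg2], st.2 ++ PySem.Chars.split₀ seg2)

def align_hypothesis_to_reference_alt (hypothesis_segments : List String) (reference : String) (language : String) : String :=
  match hypothesis_segments with
  | [] => ""
  | s0 :: rest =>
    if PySem.Set.contains pvCJK_LANGUAGES language then
      String.ofList (PySem.Chars.strip (PySem.Chars.join []
        (rest.foldl pvStepBC ([s0.toList], PySem.List.slice s0.toList (some (-45)) none)).1))
    else
      String.ofList (PySem.Chars.strip (PySem.Chars.join [' ']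
        (rest.foldl pvStepBW ([s0.toList], PySem.Chars.split₀ s0.toList)).1))

-- ===== PRECONDITION & SPEC =====
def Spec_align_hypothesis_to_reference (hypothesis_segments : List String) (reference : String) (language : String) (out : String) : Prop := out = align_hypothesis_to_reference_alt hypothesis_segments reference language
instance (hypothesis_segments : List String) (reference : String) (language : String) (out : String) : Decidable (Spec_align_hypothesis_to_reference hypothesis_segments reference language out) := by unfold Spec_align_hypothesis_to_reference; infer_instance

-- ===== CLAIM (what is proved, stated in full; the proofs are below) =====
def Claim_equal_align_hypothesis_to_reference : Prop := ∀ (hypothesis_segments : List String) (reference : String) (language : String), Dom_align_hypothesis_to_reference hypothesis_segments reference language → Spec_align_hypothesis_to_reference hypothesis_segments reference language (align_hypothesis_to_reference hypothesis_segments reference language)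

-- ===== LEMMAS AND PROOFS =====

-- sep.join(parts + [x]) = sep.join(parts) + sep + x  for nonempty parts
theorem pvJoin_append (sep x : List Char) (p : List (List Char)) (h : p ≠ []) :
    PySem.Chars.join sep (p ++ [x]) = PySem.Chars.join sep p ++ sep ++ x := by
  induction p with
  | nil => simp at h
  | cons a p ih =>
    cases p with
    | nil => simp [PySem.Chars.join_cons_cons, PySem.Chars.join_singleton]
    | cons b q =>
      simp only [List.cons_append, PySem.Chars.join_cons_cons]
      rw [← List.cons_append, ih (by simp)]
      simp

-- the accumulator of split₀.go is a prefix of the result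
theorem pvGo_acc (s : List Char) : ∀ (cur : List Char) (acc : List (List Char)),
    PySem.Chars.split₀.go s cur acc = acc.reverse ++ PySem.Chars.split₀.go s cur [] := by
  induction s with
  | nil => intro cur acc; simp [PySem.Chars.split₀.go]; split <;> simp
  | cons c s ih =>
    intro cur acc
    simp only [PySem.Chars.split₀.go]
    split
    · split
      · rw [ih [] acc]
      · rw [ih [] (cur.reverse :: acc), ih [] [cur.reverse]]; simp
    · rw [ih (c :: cur) acc]

theorem pvGo_append (b : List Char) (c : Char) (hc : PySem.Chars.isspace c = true)
    (a : List Char) : ∀ (cur : List Char) (acc : List (List Char)),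
    PySem.Chars.split₀.go (a ++ c :: b) cur acc =
      PySem.Chars.split₀.go a cur acc ++ PySem.Chars.split₀.go b [] [] := by
  induction a with
  | nil =>
    intro cur acc
    simp only [List.nil_append, PySem.Chars.split₀.go, hc, if_true]
    split
    · rw [pvGo_acc b [] acc]
    · rw [pvGo_acc b [] (cur.reverse :: acc)]
  | cons x a ih =>
    intro cur acc
    simp only [List.cons_append, PySem.Chars.split₀.go]
    split
    · split
      · rw [ih [] acc]
      · rw [ih [] (cur.reverse :: acc)]
    · rw [ih (x :: cur) acc]

-- whitespace-splitting distributes over concatenation through a whitespace char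
theorem pvSplit_append (a b : List Char) (c : Char) (hc : PySem.Chars.isspace c = true) :
    PySem.Chars.split₀ (a ++ c :: b) = PySem.Chars.split₀ a ++ PySem.Chars.split₀ b := by
  unfold PySem.Chars.split₀
  exact pvGo_append b c hc a [] []

-- the last-n-chars window of a concatenation only depends on the last-n window of the left part
theorem pvLastK_append (n : Nat) (a c : List Char) :
    List.drop ((a ++ c).length - n) (a ++ c) =
      List.drop ((List.drop (a.length - n) a ++ c).length - n) (List.drop (a.length - n) a ++ c) := by
  rw [List.drop_append, List.drop_append, List.drop_drop]
  simp only [List.length_append, List.length_drop]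
  congr 1
  · congr 1; omega
  · congr 1; omega

-- tail.endswith(head[:k]) is a comparison with the last k chars of tail
theorem pvEndswith_eq (tl hd : List Char) (k : Nat) (hh : k ≤ hd.length) :
    PySem.Chars.endswith tl (List.take k hd) = (List.drop (tl.length - k) tl == List.take k hd) := by
  rw [Bool.eq_iff_iff]
  simp only [PySem.Chars.endswith, List.isSuffixOf_iff_suffix, List.suffix_iff_eq_drop,
    List.length_take, Nat.min_eq_left hh, beq_iff_eq]
  exact eq_comm

-- k is a current match length: the last k chars of t equal the first k chars of hd
def pvMatch (t hd : List Char) (k : Nat) : Prop :=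
  k ≤ t.length ∧ k ≤ hd.length ∧ List.drop (t.length - k) t = List.take k hd

theorem pvMatch_zero (t hd : List Char) : pvMatch t hd 0 := by
  refine ⟨Nat.zero_le _, Nat.zero_le _, ?_⟩
  simp

theorem pvMatch_succ (t hd : List Char) (c : Char) (k : Nat) :
    pvMatch (t ++ [c]) hd (k+1) ↔ pvMatch t hd k ∧ k < hd.length ∧ hd.getD k ' ' = c := by
  unfold pvMatch
  constructor
  · rintro ⟨h1, h2, h3⟩
    rw [List.length_append, List.length_singleton] at h1
    have hk1 : k ≤ t.length := by omega
    have hk2 : k < hd.length := by omega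
    have hgd : hd.getD k ' ' = hd[k] := List.getD_eq_getElem hd ' ' hk2
    have hdrop : (t ++ [c]).length - (k+1) = t.length - k := by
      rw [List.length_append, List.length_singleton]; omega
    rw [hdrop, List.drop_append_of_le_length (by omega)] at h3
    have htake : List.take (k+1) hd = List.take k hd ++ [hd[k]] := by
      rw [List.take_add_one, List.getElem?_eq_getElem hk2]; rfl
    rw [htake] at h3
    have hlen : (List.drop (t.length - k) t).length = (List.take k hd).length := by
      rw [List.length_drop, List.length_take]; omega
    obtain ⟨e1, e2⟩ := List.append_inj h3 hlen
    refine ⟨⟨hk1, by omega, e1⟩, hk2, ?_⟩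
    rw [hgd]
    exact (List.singleton_inj.mp e2).symm
  · rintro ⟨⟨h1, h2, h3⟩, hk, hc⟩
    have hgd : hd.getD k ' ' = hd[k] := List.getD_eq_getElem hd ' ' hk
    refine ⟨by rw [List.length_append, List.length_singleton]; omega, by omega, ?_⟩
    have hdrop : (t ++ [c]).length - (k+1) = t.length - k := by
      rw [List.length_append, List.length_singleton]; omega
    rw [hdrop, List.drop_append_of_le_length (by omega), h3,
      List.take_add_one, List.getElem?_eq_getElem hk]
    rw [← hc, hgd]
    rfl

-- invariant of B's live list: exactly the match lengths, strictly descending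
def pvLiveInv (t hd : List Char) (live : List Nat) : Prop :=
  (∀ k ∈ live, pvMatch t hd k) ∧ (∀ k, pvMatch t hd k → k ∈ live) ∧ live.Pairwise (· > ·)

theorem pvLiveStep_inv (t hd : List Char) (c : Char) (live : List Nat)
    (h : pvLiveInv t hd live) : pvLiveInv (t ++ [c]) hd (pvLiveStep hd live c) := by
  obtain ⟨h1, h2, h3⟩ := h
  refine ⟨?_, ?_, ?_⟩
  · intro k hk
    simp only [pvLiveStep, List.mem_append, List.mem_map, List.mem_filter,
      List.mem_singleton] at hk
    rcases hk with ⟨j, ⟨hj, hg⟩, rfl⟩ | rfl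
    · simp only [Bool.and_eq_true, decide_eq_true_eq, beq_iff_eq] at hg
      exact (pvMatch_succ t hd c j).2 ⟨h1 j hj, hg.1, hg.2⟩
    · exact pvMatch_zero _ _
  · intro k hk
    cases k with
    | zero => simp [pvLiveStep]
    | succ j =>
      obtain ⟨hm, hlt, hc⟩ := (pvMatch_succ t hd c j).1 hk
      simp only [pvLiveStep, List.mem_append, List.mem_map, List.mem_filter]
      refine Or.inl ⟨j, ⟨h2 j hm, ?_⟩, rfl⟩
      simp only [Bool.and_eq_true, decide_eq_true_eq, beq_iff_eq]
      exact ⟨hlt, hc⟩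
  · unfold pvLiveStep
    rw [List.pairwise_append]
    refine ⟨?_, by simp, ?_⟩
    · rw [List.pairwise_map]
      exact (h3.sublist List.filter_sublist).imp (fun h => by omega)
    · intro a ha b hb
      simp only [List.mem_map] at ha
      obtain ⟨j, _, rfl⟩ := ha
      simp only [List.mem_singleton] at hb
      omega

theorem pvLiveInv_foldl (hd : List Char) (cs : List Char) :
    ∀ (t : List Char) (live : List Nat), pvLiveInv t hd live →
      pvLiveInv (t ++ cs) hd (cs.foldl (pvLiveStep hd) live) := by
  induction cs with
  | nil => intro t live h; simpa using h
  | cons c cs ih =>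
    intro t live h
    have := ih (t ++ [c]) (pvLiveStep hd live c) (pvLiveStep_inv t hd c live h)
    simpa using this

-- endswith test of A's scan, restated through pvMatch
theorem pvEnds_iff_match (tl hd : List Char) (k : Nat) (hh : k ≤ hd.length) :
    PySem.Chars.endswith tl (List.take k hd) = true ↔ pvMatch tl hd k := by
  rw [pvEndswith_eq tl hd k hh, beq_iff_eq]
  constructor
  · intro h
    have hlen := congrArg List.length h
    simp only [List.length_drop, List.length_take, Nat.min_eq_left hh] at hlen
    exact ⟨by omega, hh, h⟩
  · exact fun h => h.2.2

-- A's descending scan returns the greatest match length ≤ m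
theorem pvDesc_spec (tl hd : List Char) (m : Nat) (hm : m ≤ hd.length) :
    pvMatch tl hd (pvOvDescA tl hd m) ∧
      ∀ k ≤ m, pvMatch tl hd k → k ≤ pvOvDescA tl hd m := by
  induction m with
  | zero =>
    exact ⟨pvMatch_zero _ _, fun k hk _ => by omega⟩
  | succ m ih =>
    obtain ⟨ih1, ih2⟩ := ih (by omega)
    unfold pvOvDescA
    rw [PySem.List.slice_to_natCast hd]
    by_cases hE : PySem.Chars.endswith tl (List.take (m+1) hd) = true
    · simp only [hE, if_true]
      exact ⟨(pvEnds_iff_match tl hd (m+1) hm).1 hE, fun k hk _ => hk⟩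
    · simp only [hE, if_false]
      refine ⟨ih1, fun k hk hkm => ?_⟩
      rcases Nat.lt_or_ge k (m+1) with hlt | hge
      · exact ih2 k (by omega) hkm
      · have : k = m+1 := by omega
        subst this
        exact absurd ((pvEnds_iff_match tl hd (m+1) hm).2 hkm) hE

-- B's automaton equals A's descending first-hit scan
theorem pvOvAuto_eq (tl hd : List Char) :
    pvOvAuto tl hd = pvOvDescA tl hd (min tl.length hd.length) := by
  have hinit : pvLiveInv [] hd [0] := by
    refine ⟨?_, ?_, by simp⟩
    · intro k hk; simp at hk; subst hk; exact pvMatch_zero _ _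
    · intro k hk; obtain ⟨h1, _, _⟩ := hk; simp at h1; simp [h1]
  have hfin := pvLiveInv_foldl hd tl [] [0] hinit
  simp only [List.nil_append] at hfin
  obtain ⟨f1, f2, f3⟩ := hfin
  set live := tl.foldl (pvLiveStep hd) [0] with hlive
  have h0 : (0 : Nat) ∈ live := f2 0 (pvMatch_zero _ _)
  obtain ⟨r, hr⟩ := pvDesc_spec tl hd (min tl.length hd.length) (Nat.min_le_right _ _)
  cases hl : live with
  | nil => rw [hl] at h0; simp at h0
  | cons a l =>
    have hOv : pvOvAuto tl hd = a := by simp [pvOvAuto, ← hlive, hl]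
    rw [hOv]
    have hma : pvMatch tl hd a := f1 a (by simp [hl])
    have h1 : a ≤ pvOvDescA tl hd (min tl.length hd.length) :=
      hr a (by obtain ⟨x, y, _⟩ := hma; omega) hma
    have h2 : pvOvDescA tl hd (min tl.length hd.length) ≤ a := by
      have hmem := f2 _ r
      rw [hl] at hmem
      rcases List.mem_cons.1 hmem with h | h
      · omega
      · rw [hl] at f3
        have := (List.pairwise_cons.1 f3).1 _ h
        omega
    omega

-- loop invariants tying B's state to A's accumulated string
def pvInvC (j : List Char) (st : List (List Char) × List Char) : Prop :=
  st.1 ≠ [] ∧ PySem.Chars.join [] st.1 = j ∧ st.2 = List.drop (j.length - 45) j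

def pvInvW (j : List Char) (st : List (List Char) × List (List Char)) : Prop :=
  st.1 ≠ [] ∧ PySem.Chars.join [' '] st.1 = j ∧ st.2 = PySem.Chars.split₀ j

theorem pvStepC_inv (j : List Char) (st : List (List Char) × List Char) (s : String)
    (h : pvInvC j st) : pvInvC (pvStepA true [] j s) (pvStepBC st s) := by
  obtain ⟨h1, h2, h3⟩ := h
  unfold pvStepA pvStepBC
  dsimp only
  by_cases hseg : (PySem.Chars.strip s.toList).isEmpty
  · simp only [hseg, if_true]; exact ⟨h1, h2, h3⟩
  · simp only [hseg, Bool.false_eq_true, if_false, reduceIte]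
    set seg := PySem.Chars.strip s.toList with hsegdef
    have e45 : (-((15:Int)*3)) = (-(45:Int)) := by norm_num
    have e45b : ((15:Int)*3) = (45:Int) := by norm_num
    rw [e45, e45b]
    have htl : PySem.List.slice j (some (-(45:Int))) none = st.2 := by
      rw [PySem.List.slice_from_neg_ofNat j 45 (by norm_num), h3]
    rw [htl]
    set hd := PySem.List.slice seg none (some (45:Int)) with hhd
    rw [← pvOvAuto_eq st.2 hd]
    set ov := pvOvAuto st.2 hd with hov
    set seg2 := if ¬ov = 0 then PySem.Chars.lstrip (PySem.List.slice seg (some ((ov : Nat) : Int)) none) else seg with hseg2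
    by_cases hs2 : seg2.isEmpty
    · simp only [hs2, if_true]; exact ⟨h1, h2, h3⟩
    · simp only [hs2, Bool.false_eq_true, if_false]
      refine ⟨by simp, ?_, ?_⟩
      · rw [pvJoin_append [] seg2 st.1 h1, h2]
      · rw [h3]
        rw [PySem.List.slice_from_neg_ofNat (List.drop (j.length - 45) j ++ seg2) 45 (by norm_num)]
        simp only [List.append_nil]
        exact (pvLastK_append 45 j seg2).symm

theorem pvStepW_inv (j : List Char) (st : List (List Char) × List (List Char)) (s : String)
    (h : pvInvW j st) : pvInvW (pvStepA false [' '] j s) (pvStepBW st s) := by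
  obtain ⟨h1, h2, h3⟩ := h
  unfold pvStepA pvStepBW
  dsimp only
  by_cases hseg : (PySem.Chars.strip s.toList).isEmpty
  · simp only [hseg, if_true]; exact ⟨h1, h2, h3⟩
  · simp only [hseg, Bool.false_eq_true, if_false]
    set seg := PySem.Chars.strip s.toList with hsegdef
    rw [← h3]
    set tl := PySem.Chars.join [' '] (PySem.List.slice st.2 (some (-(8:Int))) none) with htl
    set hd := PySem.Chars.join [' '] (PySem.List.slice (PySem.Chars.split₀ seg) none (some (8:Int))) with hhd
    rw [← pvOvAuto_eq tl hd]
    set ov := pvOvAuto tl hd with hov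
    set seg2 := if ¬ov = 0 then PySem.Chars.lstrip (PySem.List.slice seg (some ((ov : Nat) : Int)) none) else seg with hseg2
    by_cases hs2 : seg2.isEmpty
    · simp only [hs2, if_true]; exact ⟨h1, h2, h3⟩
    · simp only [hs2, Bool.false_eq_true, if_false]
      refine ⟨by simp, ?_, ?_⟩
      · rw [pvJoin_append [' '] seg2 st.1 h1, h2]
      · rw [h3]
        have hx : j ++ [' '] ++ seg2 = j ++ ' ' :: seg2 := by simp
        rw [hx, pvSplit_append j seg2 ' ' (by decide)]

theorem pvFoldC_inv (rest : List String) (j : List Char) (st : List (List Char) × List Char)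
    (h : pvInvC j st) : pvInvC (rest.foldl (pvStepA true []) j) (rest.foldl pvStepBC st) := by
  induction rest generalizing j st with
  | nil => exact h
  | cons s rest ih => exact ih _ _ (pvStepC_inv j st s h)

theorem pvFoldW_inv (rest : List String) (j : List Char) (st : List (List Char) × List (List Char))
    (h : pvInvW j st) : pvInvW (rest.foldl (pvStepA false [' ']) j) (rest.foldl pvStepBW st) := by
  induction rest generalizing j st with
  | nil => exact h
  | cons s rest ih => exact ih _ _ (pvStepW_inv j st s h)

-- ===== VERDICT (by name: the statement is the Claim_ definition above) =====
theorem align_hypothesis_to_reference_spec : Claim_equal_align_hypothesis_to_reference := by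
  intro hs reference language _hdom
  unfold Spec_align_hypothesis_to_reference align_hypothesis_to_reference align_hypothesis_to_reference_alt
  cases hs with
  | nil => rfl
  | cons s0 rest =>
    dsimp only
    cases hcjk : PySem.Set.contains pvCJK_LANGUAGES language with
    | true =>
      simp only [if_true]
      have hinit : pvInvC s0.toList ([s0.toList], PySem.List.slice s0.toList (some (-45)) none) := by
        refine ⟨by simp, PySem.Chars.join_singleton _ _, ?_⟩
        exact PySem.List.slice_from_neg_ofNat s0.toList 45 (by norm_num)
      have hfin := pvFoldC_inv rest s0.toList _ hinit
      obtain ⟨_, h2, _⟩ := hfin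
      rw [h2]
    | false =>
      simp only [Bool.false_eq_true, if_false]
      have hinit : pvInvW s0.toList ([s0.toList], PySem.Chars.split₀ s0.toList) := by
        exact ⟨by simp, PySem.Chars.join_singleton _ _, rfl⟩
      have hfin := pvFoldW_inv rest s0.toList _ hinit
      obtain ⟨_, h2, _⟩ := hfin
      rw [h2]
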